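-- pv_equiv track=rewrite | github.com/Adahandles/ledgertrace | backend/app/trust_classifier.py | get_trust_source_links
-- ===== SOURCE A (Python) =====
-- def get_trust_source_links(entity_name: str, classification: dict) -> dict:
--     """
--     Generate relevant source document links for trust entities
--
--     Args:
--         entity_name: Name of the entity
--         classification: Trust classification results
--
--     Returns:
--         dict: Source links relevant to trust type
--     """
--     encoded_name = entity_name.replace(" ", "%20")
--     sources = {}
--
--     # Standard business/corporate sources
--     sources["sunbiz"] = f"http://search.sunbiz.org/Inquiry/CorporationSearch/SearchResults?InquiryType=EntityName&SearchTerm={encoded_name}"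
--
--     # If it's a charitable trust, include IRS 990 lookup
--     if "Charitable Trust" in classification.get("trust_types", []):
--         sources["irs_990"] = f"https://apps.irs.gov/app/eos/allSearch?names={encoded_name}"
--         sources["charity_navigator"] = f"https://www.charitynavigator.org/index.cfm?bay=search.summary&orgname={encoded_name}"
--
--     # If it's an investment trust or REIT, include SEC lookup
--     if any(t in ["Investment Trust", "REIT (Trust)"] for t in classification.get("trust_types", [])):
--         sources["sec_edgar"] = f"https://www.sec.gov/cgi-bin/browse-edgar?company={encoded_name}&match=contains"
--
--     # Court records for probate/testamentary trusts
--     if "Testamentary Trust" in classification.get("trust_types", []):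
--         sources["court_records"] = f"https://www.courtrecords.org/search?name={encoded_name}"
--
--     return sources
-- ===== SOURCE B (Python) =====
-- # Inverted index: map each trust type to the source keys it enables, union those over
-- # the present types into an 'active' key set, then emit the fixed catalog filtered by it.
--
-- TYPE_KEYS = {
--     "Charitable Trust": ("irs_990", "charity_navigator"),
--     "Investment Trust": ("sec_edgar",),
--     "REIT (Trust)": ("sec_edgar",),
--     "Testamentary Trust": ("court_records",),
-- }
--
-- CATALOG = [
--     ("sunbiz", "http://search.sunbiz.org/Inquiry/CorporationSearch/SearchResults?InquiryType=EntityName&SearchTerm=", ""),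
--     ("irs_990", "https://apps.irs.gov/app/eos/allSearch?names=", ""),
--     ("charity_navigator", "https://www.charitynavigator.org/index.cfm?bay=search.summary&orgname=", ""),
--     ("sec_edgar", "https://www.sec.gov/cgi-bin/browse-edgar?company=", "&match=contains"),
--     ("court_records", "https://www.courtrecords.org/search?name=", ""),
-- ]
--
--
-- def get_trust_source_links(entity_name: str, classification: dict) -> dict:
--     encoded_name = entity_name.replace(" ", "%20")
--     active = {"sunbiz"}
--     for t in classification.get("trust_types", []):
--         active.update(TYPE_KEYS.get(t, ()))
--     return {key: pre + encoded_name + suf for key, pre, suf in CATALOG if key in active}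
-- ===== Notes on version B (the rewrite author's own statement) =====
-- stated objective: idiomatic
-- what changed: Inverts the control flow: instead of four per-source conditionals scanning the trust types, B builds an inverted index from trust type to the source keys it enables, unions the keys of the present types into an active set in one pass, then emits a fixed ordered catalog filtered by that set.
import Mathlib
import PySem

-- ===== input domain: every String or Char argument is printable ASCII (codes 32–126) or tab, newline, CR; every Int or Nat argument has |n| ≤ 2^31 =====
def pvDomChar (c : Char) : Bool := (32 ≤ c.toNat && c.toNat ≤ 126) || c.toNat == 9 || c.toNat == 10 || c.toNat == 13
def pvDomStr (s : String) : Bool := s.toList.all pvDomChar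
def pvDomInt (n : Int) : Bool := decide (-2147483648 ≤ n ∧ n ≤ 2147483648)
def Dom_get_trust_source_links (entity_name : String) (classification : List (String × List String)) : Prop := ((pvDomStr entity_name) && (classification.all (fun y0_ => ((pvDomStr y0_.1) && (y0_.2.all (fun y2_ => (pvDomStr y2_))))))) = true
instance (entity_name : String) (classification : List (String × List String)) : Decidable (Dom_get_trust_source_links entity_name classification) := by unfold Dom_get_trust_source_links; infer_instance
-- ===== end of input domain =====

-- B inverts A's control flow: an inverted index from trust type to the source keys it enables,
-- an active-key set unioned over the present types, then a fixed catalog filtered by it; objective: idiomatic, same cost.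


-- ===== PORT A =====
def get_trust_source_links (entity_name : String) (classification : List (String × List String)) : List (String × String) :=
  let encoded_name := PySem.Str.replace entity_name " " "%20"
  let sources : PySem.Dict String String := PySem.Dict.empty
  -- Standard business/corporate sources
  let sources := sources.insert "sunbiz" ("http://search.sunbiz.org/Inquiry/CorporationSearch/SearchResults?InquiryType=EntityName&SearchTerm=" ++ encoded_name)
  -- If it's a charitable trust, include IRS 990 lookup
  let sources :=
    if (PySem.Dict.getD (PySem.Dict.mk classification) "trust_types" []).contains "Charitable Trust" then
      ((sources.insert "irs_990" ("https://apps.irs.gov/app/eos/allSearch?names=" ++ encoded_name)).insert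
        "charity_navigator" ("https://www.charitynavigator.org/index.cfm?bay=search.summary&orgname=" ++ encoded_name))
    else sources
  -- If it's an investment trust or REIT, include SEC lookup
  let sources :=
    if (PySem.Dict.getD (PySem.Dict.mk classification) "trust_types" []).any
        (fun t => (["Investment Trust", "REIT (Trust)"] : List String).contains t) then
      sources.insert "sec_edgar" ("https://www.sec.gov/cgi-bin/browse-edgar?company=" ++ encoded_name ++ "&match=contains")
    else sources
  -- Court records for probate/testamentary trusts
  let sources :=
    if (PySem.Dict.getD (PySem.Dict.mk classification) "trust_types" []).contains "Testamentary Trust" then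
      sources.insert "court_records" ("https://www.courtrecords.org/search?name=" ++ encoded_name)
    else sources
  sources.items

-- ===== PORT B =====
-- TYPE_KEYS.get(t, ()): the inverted index, trust type → source keys it enables
def pvTypeKeys (t : String) : List String :=
  if t = "Charitable Trust" then ["irs_990", "charity_navigator"]
  else if t = "Investment Trust" then ["sec_edgar"]
  else if t = "REIT (Trust)" then ["sec_edgar"]
  else if t = "Testamentary Trust" then ["court_records"]
  else []

-- CATALOG: fixed emission order, (key, url-prefix, url-suffix)
def pvCatalog : List (String × String × String) :=
  [ ("sunbiz", "http://search.sunbiz.org/Inquiry/CorporationSearch/SearchResults?InquiryType=EntityName&SearchTerm=", ""),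
    ("irs_990", "https://apps.irs.gov/app/eos/allSearch?names=", ""),
    ("charity_navigator", "https://www.charitynavigator.org/index.cfm?bay=search.summary&orgname=", ""),
    ("sec_edgar", "https://www.sec.gov/cgi-bin/browse-edgar?company=", "&match=contains"),
    ("court_records", "https://www.courtrecords.org/search?name=", "") ]

def get_trust_source_links_alt (entity_name : String) (classification : List (String × List String)) : List (String × String) :=
  let encoded_name := PySem.Str.replace entity_name " " "%20"
  let active : PySem.Set String :=
    (PySem.Dict.getD (PySem.Dict.mk classification) "trust_types" []).foldl
      (fun s t => PySem.Set.update s (pvTypeKeys t)) (PySem.Set.ofList ["sunbiz"])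
  pvCatalog.filterMap (fun e =>
    if PySem.Set.contains active e.1 then some (e.1, e.2.1 ++ encoded_name ++ e.2.2) else none)

-- ===== PRECONDITION & SPEC =====
def Spec_get_trust_source_links (entity_name : String) (classification : List (String × List String)) (out : List (String × String)) : Prop := out = get_trust_source_links_alt entity_name classification
instance (entity_name : String) (classification : List (String × List String)) (out : List (String × String)) : Decidable (Spec_get_trust_source_links entity_name classification out) := by unfold Spec_get_trust_source_links; infer_instance

-- ===== CLAIM =====
def Claim_equal_get_trust_source_links : Prop := ∀ (entity_name : String) (classification : List (String × List String)), Dom_get_trust_source_links entity_name classification → Spec_get_trust_source_links entity_name classification (get_trust_source_links entity_name classification)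

-- ===== LEMMAS AND PROOFS =====
-- membership in the active set built by B's fold of updates
lemma mem_foldl_update (ts : List String) (s : PySem.Set String) (k : String) :
    k ∈ ts.foldl (fun s t => PySem.Set.update s (pvTypeKeys t)) s ↔
      k ∈ s ∨ ∃ t ∈ ts, k ∈ pvTypeKeys t := by
  induction ts generalizing s with
  | nil => simp
  | cons t ts ih => simp [ih, PySem.Set.mem_update]; tauto

-- which trust types enable each source key (the inverted index evaluated at each catalog key)
lemma mem_typeKeys_irs (t : String) : ("irs_990" ∈ pvTypeKeys t) ↔ t = "Charitable Trust" := by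
  unfold pvTypeKeys; split_ifs with h1 h2 h3 h4 <;> simp_all
lemma mem_typeKeys_cn (t : String) : ("charity_navigator" ∈ pvTypeKeys t) ↔ t = "Charitable Trust" := by
  unfold pvTypeKeys; split_ifs with h1 h2 h3 h4 <;> simp_all
lemma mem_typeKeys_sec (t : String) :
    ("sec_edgar" ∈ pvTypeKeys t) ↔ (t = "Investment Trust" ∨ t = "REIT (Trust)") := by
  unfold pvTypeKeys; split_ifs with h1 h2 h3 h4 <;> simp_all
lemma mem_typeKeys_court (t : String) : ("court_records" ∈ pvTypeKeys t) ↔ t = "Testamentary Trust" := by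
  unfold pvTypeKeys; split_ifs with h1 h2 h3 h4 <;> simp_all
lemma mem_typeKeys_sunbiz (t : String) : ("sunbiz" ∈ pvTypeKeys t) ↔ False := by
  unfold pvTypeKeys; split_ifs with h1 h2 h3 h4 <;> simp_all

-- B's active-set test, as a boolean over the raw types list
lemma contains_active (ts : List String) (k : String) :
    PySem.Set.contains
      (ts.foldl (fun s t => PySem.Set.update s (pvTypeKeys t)) (PySem.Set.ofList ["sunbiz"])) k
      = (k == "sunbiz" || ts.any (fun t => (pvTypeKeys t).contains k)) := by
  rw [Bool.eq_iff_iff, PySem.Set.contains_iff, mem_foldl_update]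
  simp [PySem.Set.mem_ofList, List.any_eq_true]

-- the any-scan over the inverted index at a fixed key = the direct membership tests A makes
lemma any_typeKeys (ts : List String) (k : String) (P : String → Prop)
    (h : ∀ t, k ∈ pvTypeKeys t ↔ P t) :
    (ts.any (fun t => (pvTypeKeys t).contains k) = true) ↔ ∃ t ∈ ts, P t := by
  simp only [List.any_eq_true]
  constructor
  · rintro ⟨t, ht, hk⟩; exact ⟨t, ht, (h t).mp (by simpa using hk)⟩
  · rintro ⟨t, ht, hp⟩; exact ⟨t, ht, by simpa using (h t).mpr hp⟩

-- ===== VERDICT =====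
theorem get_trust_source_links_spec : Claim_equal_get_trust_source_links := by
  intro entity_name classification _
  unfold Spec_get_trust_source_links get_trust_source_links get_trust_source_links_alt pvCatalog
  set types := PySem.Dict.getD (PySem.Dict.mk classification) "trust_types" [] with htypes
  simp only [List.filterMap, contains_active]
  have hirs : (types.any fun t => (pvTypeKeys t).contains "irs_990") = types.contains "Charitable Trust" := by
    rw [Bool.eq_iff_iff, any_typeKeys _ _ _ mem_typeKeys_irs]; simp
  have hcn : (types.any fun t => (pvTypeKeys t).contains "charity_navigator") = types.contains "Charitable Trust" := by
    rw [Bool.eq_iff_iff, any_typeKeys _ _ _ mem_typeKeys_cn]; simp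
  have hsec : (types.any fun t => (pvTypeKeys t).contains "sec_edgar")
      = (types.contains "Investment Trust" || types.contains "REIT (Trust)") := by
    rw [Bool.eq_iff_iff, any_typeKeys _ _ _ mem_typeKeys_sec]
    simp only [Bool.or_eq_true, List.contains_iff_mem]
    constructor
    · rintro ⟨t, ht, h | h⟩ <;> subst h <;> tauto
    · rintro (h | h) <;> exact ⟨_, h, by simp⟩
  have hcourt : (types.any fun t => (pvTypeKeys t).contains "court_records") = types.contains "Testamentary Trust" := by
    rw [Bool.eq_iff_iff, any_typeKeys _ _ _ mem_typeKeys_court]; simp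
  have hsun : (types.any fun t => (pvTypeKeys t).contains "sunbiz") = false := by
    rw [Bool.eq_false_iff]
    intro hc
    obtain ⟨t, -, hk⟩ := (any_typeKeys _ _ _ mem_typeKeys_sunbiz).mp hc
    exact hk
  have h2 : (types.any fun t => (["Investment Trust", "REIT (Trust)"] : List String).contains t)
      = (types.contains "Investment Trust" || types.contains "REIT (Trust)") := by
    rw [Bool.eq_iff_iff]
    simp only [List.any_eq_true, Bool.or_eq_true, List.contains_iff_mem, List.mem_cons,
      List.not_mem_nil, or_false]
    constructor
    · rintro ⟨t, ht, h | h⟩ <;> subst h <;> tauto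
    · rintro (h | h) <;> exact ⟨_, h, by simp⟩
  rw [hirs, hcn, hsec, hcourt, hsun, h2]
  by_cases hc : "Charitable Trust" ∈ types <;>
    by_cases hi : "Investment Trust" ∈ types <;>
    by_cases hr : "REIT (Trust)" ∈ types <;>
    by_cases ht : "Testamentary Trust" ∈ types <;>
    simp [hc, hi, hr, ht, PySem.Dict.insert, PySem.Dict.empty]
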